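-- pv_equiv track=rewrite | github.com/itancio/pentagram | backend/prompt.py | find_and_order_pairs
-- ===== SOURCE A (Python) =====
-- def find_and_order_pairs(s, pairs):
--     words = s.split()
--     found_pairs = []
--     for pair in pairs:
--         pair_words = pair.split()
--         if pair_words[0] in words and pair_words[1] in words:
--             found_pairs.append(pair)
--             words.remove(pair_words[0])
--             words.remove(pair_words[1])
--
--     for word in words[:]:
--         for pair in pairs:
--             if word in pair.split():
--                 words.remove(word)
--                 break
--     ordered_pairs = ", ".join(found_pairs)
--     remaining_s = ", ".join(words)
--     return ordered_pairs, remaining_s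
-- ===== SOURCE B (Python) =====
-- def find_and_order_pairs(s, pairs):
--     source = s.split()
--     budget = {}
--     for w in source:
--         budget[w] = budget.get(w, 0) + 1
--
--     def take(p):
--         pw = p.split()
--         if budget.get(pw[0], 0) and budget.get(pw[1], 0):
--             budget[pw[0]] -= 1
--             budget[pw[1]] -= 1
--             return True
--         return False
--
--     found = [p for p in pairs if take(p)]
--     pair_words = {w for p in pairs for w in p.split()}
--     return ", ".join(found), ", ".join(w for w in source if w not in pair_words)
-- ===== Notes on version B (the rewrite author's own statement) =====
-- stated objective: alternative
-- what changed: B replaces A's mutable word pool (repeated 'in'-scans and list.remove, plus A's whole second nested removal loop) by a word-count multiset consumed by a stateful filter over pairs, and computes the leftover words by one independent filter of the original words against the set of all pair-words, so A's second loop disappears entirely.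
-- outside the precondition, e.g. on find_and_order_pairs('a b', ['a b', 'a']): A returns ('a b', ''), B returns ('a b', ''); on find_and_order_pairs('a b', ['a b', 'a a']): A returns ('a b', ''), B returns ('a b', '')
import Mathlib
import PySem

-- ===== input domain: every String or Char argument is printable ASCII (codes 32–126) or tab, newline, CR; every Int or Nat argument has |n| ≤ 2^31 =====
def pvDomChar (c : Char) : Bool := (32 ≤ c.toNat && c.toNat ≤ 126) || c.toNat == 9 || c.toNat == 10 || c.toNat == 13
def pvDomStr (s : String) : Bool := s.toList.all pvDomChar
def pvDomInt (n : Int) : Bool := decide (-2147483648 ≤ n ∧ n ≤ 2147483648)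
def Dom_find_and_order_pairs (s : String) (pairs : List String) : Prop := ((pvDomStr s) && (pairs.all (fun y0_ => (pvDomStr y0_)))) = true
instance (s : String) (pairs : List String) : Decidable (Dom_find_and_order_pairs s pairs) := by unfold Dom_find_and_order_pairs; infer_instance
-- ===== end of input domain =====

-- B replaces A's mutable word pool (membership scans and list.remove, plus A's whole second
-- nested removal loop) by a word-count multiset driving a single stateful-filter pass over pairs, and gets
-- the leftover words by one independent filter of the original words against the set of all
-- pair-words (objective: alternative).

-- ===== PORT A =====
-- body of A's first loop: check both pair words in the pool, append the pair, remove both words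
def pvStepA (st : List String × List String) (pair : String) : List String × List String :=
  let pw := PySem.Str.split₀ pair
  let w0 := PySem.List.pyGetD pw 0 ""
  let w1 := PySem.List.pyGetD pw 1 ""
  if w0 ∈ st.2 ∧ w1 ∈ st.2 then (st.1 ++ [pair], (st.2.erase w0).erase w1) else st

-- body of A's second loop: 'for pair in pairs: if word in pair.split(): words.remove(word); break'
def pvDropStep (pairs : List String) (ws : List String) (word : String) : List String :=
  if pairs.any (fun p => (PySem.Str.split₀ p).contains word) then ws.erase word else ws

def find_and_order_pairs (s : String) (pairs : List String) : String × String :=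
  let words := PySem.Str.split₀ s
  let st := pairs.foldl pvStepA ([], words)
  let words2 := st.2.foldl (pvDropStep pairs) st.2   -- iterate over the snapshot words[:]
  (PySem.Str.join ", " st.1, PySem.Str.join ", " words2)

-- ===== PORT B =====
-- B's '[p for p in pairs if take(p)]': the stateful filter, with the word-count dict threaded through
def pvGoB (budget : PySem.Dict String Int) : List String → List String
  | [] => []
  | p :: ps =>
    let pw := PySem.Str.split₀ p
    let w0 := PySem.List.pyGetD pw 0 ""
    let w1 := PySem.List.pyGetD pw 1 ""
    if budget.getD w0 0 ≠ 0 ∧ budget.getD w1 0 ≠ 0 then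
      let b1 := budget.insert w0 (budget.getD w0 0 - 1)
      p :: pvGoB (b1.insert w1 (b1.getD w1 0 - 1)) ps
    else pvGoB budget ps

def find_and_order_pairs_alt (s : String) (pairs : List String) : String × String :=
  let source := PySem.Str.split₀ s
  let budget := source.foldl (fun (c : PySem.Dict String Int) w => c.insert w (c.getD w 0 + 1)) PySem.Dict.empty
  let found := pvGoB budget pairs
  let pair_words := pairs.foldl (fun t p => PySem.Set.update t (PySem.Str.split₀ p)) PySem.Set.empty
  (PySem.Str.join ", " found,
   PySem.Str.join ", " (source.filter (fun w => !(PySem.Set.contains pair_words w))))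

-- ===== PRECONDITION & SPEC =====
-- occurrences of w among the first two words of pair p (the words A's loop removes)
def pvOcc (w p : String) : Nat :=
  let pw := PySem.Str.split₀ p
  [PySem.List.pyGetD pw 0 "", PySem.List.pyGetD pw 1 ""].count w

def pvDemand (w : String) (l : List String) : Nat := (l.map (fun p => pvOcc w p)).sum

def pvPairOk (s : String) (seen : List String) (p : String) : Prop :=
  let pw := PySem.Str.split₀ p
  pw ≠ [] ∧
  (pw.length = 1 → PySem.List.pyGetD pw 0 "" ∉ PySem.Str.split₀ s) ∧
  (PySem.List.pyGetD pw 0 "" = PySem.List.pyGetD pw 1 "" → 2 ≤ pw.length →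
    (PySem.List.pyGetD pw 0 "" ∉ PySem.Str.split₀ s ∨
     pvDemand (PySem.List.pyGetD pw 0 "") seen + 2 ≤
       (PySem.Str.split₀ s).count (PySem.List.pyGetD pw 0 "")))

-- Pre_ excludes exactly the statically unsafe pairs on which A can raise: pairs splitting to
-- no words (IndexError), one-word pairs whose word occurs in s (IndexError unless the pool no
-- longer holds the word), and equal-word pairs whose word occurs in s without enough copies of
-- it in s to cover all earlier pair demands plus two (ValueError on the second remove unless
-- the pool happens to be depleted); whether A actually raises on the latter two kinds depends
-- on the evolving pool, so this static bound is slightly conservative (see the cited examples,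
-- where A returns and B agrees).
def Pre_find_and_order_pairs (s : String) (pairs : List String) : Prop :=
  ∀ i, (h : i < pairs.length) → pvPairOk s (pairs.take i) pairs[i]

instance (s : String) (pairs : List String) : Decidable (Pre_find_and_order_pairs s pairs) := by
  unfold Pre_find_and_order_pairs pvPairOk; infer_instance

def pvWitness_find_and_order_pairs : String × List String := ("a b c", ["a b"])

def Spec_find_and_order_pairs (s : String) (pairs : List String) (out : String × String) : Prop := out = find_and_order_pairs_alt s pairs
instance (s : String) (pairs : List String) (out : String × String) : Decidable (Spec_find_and_order_pairs s pairs out) := by unfold Spec_find_and_order_pairs; infer_instance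

-- ===== CLAIM (what is proved, stated in full; the proofs are below) =====
def Claim_equal_find_and_order_pairs : Prop := ∀ (s : String) (pairs : List String), Dom_find_and_order_pairs s pairs → Pre_find_and_order_pairs s pairs → Spec_find_and_order_pairs s pairs (find_and_order_pairs s pairs)

-- ===== LEMMAS AND PROOFS =====

-- one matched pair with distinct words: decrementing the two counters tracks erasing the two words
lemma pv_counter_step (c : PySem.Dict String Int) (words : List String) (a b : String)
    (hne : a ≠ b) (h0 : 1 ≤ words.count a) (h1 : 1 ≤ words.count b)
    (hc : ∀ w, c.getD w 0 = (words.count w : Int)) (w : String) :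
    ((c.insert a (c.getD a 0 - 1)).insert b ((c.insert a (c.getD a 0 - 1)).getD b 0 - 1)).getD w 0
      = (((words.erase a).erase b).count w : Int) := by
  simp only [PySem.Dict.getD_insert, List.count_erase, beq_iff_eq]
  have hca := hc a; have hcb := hc b; have hcw := hc w
  split_ifs <;> subst_vars <;> first | exact (hne rfl).elim | omega | (simp_all; try omega)

-- one matched pair with equal words: decrementing the same counter twice tracks erasing twice
lemma pv_counter_step_dup (c : PySem.Dict String Int) (words : List String) (a : String)
    (h2 : 2 ≤ words.count a)
    (hc : ∀ w, c.getD w 0 = (words.count w : Int)) (w : String) :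
    ((c.insert a (c.getD a 0 - 1)).insert a ((c.insert a (c.getD a 0 - 1)).getD a 0 - 1)).getD w 0
      = (((words.erase a).erase a).count w : Int) := by
  simp only [PySem.Dict.getD_insert, List.count_erase, beq_iff_eq]
  have hca := hc a; have hcw := hc w
  split_ifs <;> subst_vars <;> (simp_all; try omega)

-- erasing both pair words costs each word count at most its multiplicity in the pair's head
lemma pv_low_step (pool : List String) (w0 w1 w : String) :
    pool.count w ≤ ((pool.erase w0).erase w1).count w + [w0, w1].count w := by
  simp only [List.count_erase, List.count_cons, List.count_nil, beq_iff_eq]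
  split_ifs <;> omega

-- erasing an element the filter drops anyway does not change the filter
lemma pv_filter_erase (p : String → Bool) (l : List String) (a : String) (ha : p a = false) :
    (l.erase a).filter p = l.filter p := by
  induction l with
  | nil => simp
  | cons x t ih =>
    rw [List.erase_cons]
    by_cases hx : x = a
    · subst hx; simp [ha]
    · simp only [beq_iff_eq, hx, if_false, List.filter_cons, ih]

-- A's second loop never erases a word the drop-predicate keeps
lemma pv_drop_cons (pairs : List String) (l : List String) (w : String) (r : List String)
    (hw : pairs.any (fun p => (PySem.Str.split₀ p).contains w) = false) :
    l.foldl (pvDropStep pairs) (w :: r) = w :: l.foldl (pvDropStep pairs) r := by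
  induction l generalizing r with
  | nil => rfl
  | cons x t ih =>
    simp only [List.foldl_cons]
    by_cases hx : pairs.any (fun p => (PySem.Str.split₀ p).contains x) = true
    · have hwx : (w == x) = false := by
        refine beq_false_of_ne fun h => ?_
        rw [h] at hw; rw [hx] at hw; cases hw
      rw [pvDropStep, pvDropStep, if_pos hx, if_pos hx, List.erase_cons, hwx]
      simp only [Bool.false_eq_true, if_false]
      exact ih _
    · rw [pvDropStep, pvDropStep, if_neg hx, if_neg hx]
      exact ih _

-- A's second loop over the snapshot is a filter of the pool
lemma pv_drop_eq_filter (pairs : List String) (l : List String) :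
    l.foldl (pvDropStep pairs) l =
      l.filter (fun w => !(pairs.any (fun p => (PySem.Str.split₀ p).contains w))) := by
  induction l with
  | nil => rfl
  | cons w t ih =>
    simp only [List.foldl_cons, List.filter_cons]
    by_cases hw : pairs.any (fun p => (PySem.Str.split₀ p).contains w) = true
    · rw [pvDropStep, if_pos hw, List.erase_cons_head, hw]
      simpa using ih
    · have hw' : pairs.any (fun p => (PySem.Str.split₀ p).contains w) = false :=
        Bool.eq_false_iff.mpr hw
      rw [pvDropStep, if_neg hw, pv_drop_cons pairs t w t hw', hw']
      simp [ih]

-- membership in the accumulated pair-word set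
lemma pv_pws_mem (l : List String) : ∀ (t : PySem.Set String) (w : String),
    (w ∈ l.foldl (fun t p => PySem.Set.update t (PySem.Str.split₀ p)) t) ↔
      (w ∈ t ∨ ∃ p ∈ l, w ∈ PySem.Str.split₀ p) := by
  induction l with
  | nil => intro t w; simp
  | cons x xs ih =>
    intro t w
    simp only [List.foldl_cons, ih, PySem.Set.mem_update, List.mem_cons]
    constructor
    · rintro (⟨h | h⟩ | ⟨p, hp, h⟩)
      · exact Or.inl h
      · exact Or.inr ⟨x, Or.inl rfl, h⟩
      · exact Or.inr ⟨p, Or.inr hp, h⟩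
    · rintro (h | ⟨p, hp | hp, h⟩)
      · exact Or.inl (Or.inl h)
      · exact Or.inl (Or.inr (hp ▸ h))
      · exact Or.inr ⟨p, hp, h⟩

lemma pv_demand_append (w : String) (l : List String) (p : String) :
    pvDemand w (l ++ [p]) = pvDemand w l + pvOcc w p := by
  simp [pvDemand]

-- the main loop relation: B's counter-driven filter runs in lockstep with A's pool loop
lemma pv_rel (s : String) (qb : String → Bool) :
    ∀ (ps : List String), ∀ (seen found pool : List String) (c : PySem.Dict String Int),
    (∀ i, (h : i < ps.length) → pvPairOk s (seen ++ ps.take i) ps[i]) →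
    (∀ p ∈ ps, ∀ w ∈ PySem.Str.split₀ p, qb w = false) →
    (∀ w, pool.count w ≤ (PySem.Str.split₀ s).count w) →
    (∀ w, (PySem.Str.split₀ s).count w ≤ pool.count w + pvDemand w seen) →
    (∀ w, c.getD w 0 = (pool.count w : Int)) →
    (ps.foldl pvStepA (found, pool)).1 = found ++ pvGoB c ps
    ∧ (ps.foldl pvStepA (found, pool)).2.filter qb = pool.filter qb := by
  intro ps
  induction ps with
  | nil => intro seen found pool c _ _ _ _ _; simp [pvGoB]
  | cons p ps ih =>
    intro seen found pool c hsafe hqb hup hlow hc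
    have hok : pvPairOk s seen p := by simpa using hsafe 0 (by simp)
    have hsafe' : ∀ i, (h : i < ps.length) → pvPairOk s ((seen ++ [p]) ++ ps.take i) ps[i] := by
      intro i h
      have := hsafe (i + 1) (by simpa using Nat.succ_lt_succ h)
      rw [List.take_succ_cons, List.getElem_cons_succ, List.append_cons] at this
      exact this
    have hqb' : ∀ x ∈ ps, ∀ w ∈ PySem.Str.split₀ x, qb w = false :=
      fun x hx => hqb x (List.mem_cons_of_mem _ hx)
    have hqbp : ∀ w ∈ PySem.Str.split₀ p, qb w = false := hqb p List.mem_cons_self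
    simp only [List.foldl_cons, pvStepA, pvGoB]
    by_cases hA : PySem.List.pyGetD (PySem.Str.split₀ p) 0 "" ∈ pool ∧
        PySem.List.pyGetD (PySem.Str.split₀ p) 1 "" ∈ pool
    · -- the pair matches in both programs
      have h0 : 1 ≤ pool.count (PySem.List.pyGetD (PySem.Str.split₀ p) 0 "") :=
        List.count_pos_iff.mpr hA.1
      have h1 : 1 ≤ pool.count (PySem.List.pyGetD (PySem.Str.split₀ p) 1 "") :=
        List.count_pos_iff.mpr hA.2
      have hw0s : PySem.List.pyGetD (PySem.Str.split₀ p) 0 "" ∈ PySem.Str.split₀ s := by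
        have := hup (PySem.List.pyGetD (PySem.Str.split₀ p) 0 "")
        exact List.count_pos_iff.mp (by omega)
      have hlen : 2 ≤ (PySem.Str.split₀ p).length := by
        have hpos : 1 ≤ (PySem.Str.split₀ p).length := List.length_pos_iff.mpr hok.1
        have hne1 : (PySem.Str.split₀ p).length ≠ 1 := fun h => (hok.2.1 h) hw0s
        omega
      have hB : c.getD (PySem.List.pyGetD (PySem.Str.split₀ p) 0 "") 0 ≠ 0 ∧
          c.getD (PySem.List.pyGetD (PySem.Str.split₀ p) 1 "") 0 ≠ 0 := by
        rw [hc, hc]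
        constructor <;> · simp only [ne_eq, Nat.cast_eq_zero]; omega
      rw [if_pos hA, if_pos hB]
      have hq0 : qb (PySem.List.pyGetD (PySem.Str.split₀ p) 0 "") = false := by
        apply hqbp
        rw [PySem.List.pyGetD_eq_getElem (h0 := by omega) (h1 := by exact_mod_cast (by omega : 0 < (PySem.Str.split₀ p).length))]
        exact List.getElem_mem _
      have hq1 : qb (PySem.List.pyGetD (PySem.Str.split₀ p) 1 "") = false := by
        apply hqbp
        rw [PySem.List.pyGetD_eq_getElem (h0 := by omega) (h1 := by exact_mod_cast (by omega : 1 < (PySem.Str.split₀ p).length))]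
        exact List.getElem_mem _
      have hlow' : ∀ w, (PySem.Str.split₀ s).count w ≤
          ((pool.erase (PySem.List.pyGetD (PySem.Str.split₀ p) 0 "")).erase
            (PySem.List.pyGetD (PySem.Str.split₀ p) 1 "")).count w + pvDemand w (seen ++ [p]) := by
        intro w
        have hls := pv_low_step pool (PySem.List.pyGetD (PySem.Str.split₀ p) 0 "")
          (PySem.List.pyGetD (PySem.Str.split₀ p) 1 "") w
        have := hlow w
        rw [pv_demand_append]
        have hocc : pvOcc w p = [PySem.List.pyGetD (PySem.Str.split₀ p) 0 "",
            PySem.List.pyGetD (PySem.Str.split₀ p) 1 ""].count w := rfl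
        omega
      have hup' : ∀ w, ((pool.erase (PySem.List.pyGetD (PySem.Str.split₀ p) 0 "")).erase
            (PySem.List.pyGetD (PySem.Str.split₀ p) 1 "")).count w ≤ (PySem.Str.split₀ s).count w := by
        intro w
        have := hup w
        rw [List.count_erase, List.count_erase]
        omega
      have hc' : ∀ w, ((c.insert (PySem.List.pyGetD (PySem.Str.split₀ p) 0 "")
            (c.getD (PySem.List.pyGetD (PySem.Str.split₀ p) 0 "") 0 - 1)).insert
            (PySem.List.pyGetD (PySem.Str.split₀ p) 1 "")
            ((c.insert (PySem.List.pyGetD (PySem.Str.split₀ p) 0 "")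
              (c.getD (PySem.List.pyGetD (PySem.Str.split₀ p) 0 "") 0 - 1)).getD
              (PySem.List.pyGetD (PySem.Str.split₀ p) 1 "") 0 - 1)).getD w 0
          = (((pool.erase (PySem.List.pyGetD (PySem.Str.split₀ p) 0 "")).erase
              (PySem.List.pyGetD (PySem.Str.split₀ p) 1 "")).count w : Int) := by
        by_cases hdup : PySem.List.pyGetD (PySem.Str.split₀ p) 0 "" =
            PySem.List.pyGetD (PySem.Str.split₀ p) 1 ""
        · -- equal words: Pre_ guarantees at least two copies in the pool
          have h2 : 2 ≤ pool.count (PySem.List.pyGetD (PySem.Str.split₀ p) 0 "") := by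
            rcases hok.2.2 hdup hlen with hnot | hdem
            · exact absurd hw0s hnot
            · have := hlow (PySem.List.pyGetD (PySem.Str.split₀ p) 0 "")
              omega
          intro w
          rw [← hdup]
          exact pv_counter_step_dup c pool _ h2 hc w
        · intro w
          exact pv_counter_step c pool _ _ hdup h0 h1 hc w
      obtain ⟨r1, r2⟩ := ih (seen ++ [p]) (found ++ [p]) _ _ hsafe' hqb' hup' hlow' hc'
      refine ⟨?_, ?_⟩
      · rw [r1, List.append_assoc, List.singleton_append]
      · rw [r2, pv_filter_erase qb _ _ hq1, pv_filter_erase qb _ _ hq0]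
    · -- no match in either program
      have hB : ¬ (c.getD (PySem.List.pyGetD (PySem.Str.split₀ p) 0 "") 0 ≠ 0 ∧
          c.getD (PySem.List.pyGetD (PySem.Str.split₀ p) 1 "") 0 ≠ 0) := by
        rw [hc, hc]
        rintro ⟨hx, hy⟩
        exact hA ⟨List.count_pos_iff.mp (by omega : 0 < pool.count _),
                  List.count_pos_iff.mp (by omega : 0 < pool.count _)⟩
      rw [if_neg hA, if_neg hB]
      have hlow' : ∀ w, (PySem.Str.split₀ s).count w ≤ pool.count w + pvDemand w (seen ++ [p]) := by
        intro w
        have := hlow w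
        rw [pv_demand_append]
        omega
      exact ih (seen ++ [p]) found pool c hsafe' hqb' hup hlow' hc

-- ===== VERDICT (by name: the statement is the Claim_ definition above) =====
theorem find_and_order_pairs_spec : Claim_equal_find_and_order_pairs := by
  intro s pairs _ hpre
  unfold Spec_find_and_order_pairs
  have hcounts : ∀ w, ((PySem.Str.split₀ s).foldl
        (fun (c : PySem.Dict String Int) w => c.insert w (c.getD w 0 + 1)) PySem.Dict.empty).getD w 0
      = (((PySem.Str.split₀ s).count w : Nat) : Int) := by
    intro w
    rw [PySem.Dict.getD_foldl_insert_add_one]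
    simp
  have hqb : ∀ p ∈ pairs, ∀ w ∈ PySem.Str.split₀ p,
      (!(pairs.any (fun q => (PySem.Str.split₀ q).contains w))) = false := by
    intro p hp w hw
    simp only [Bool.not_eq_false', List.any_eq_true, List.contains_iff_mem]
    exact ⟨p, hp, hw⟩
  have hsafe : ∀ i, (h : i < pairs.length) → pvPairOk s ([] ++ pairs.take i) pairs[i] := by
    intro i h; simpa using hpre i h
  obtain ⟨hfound, hfilter⟩ :=
    pv_rel s (fun w => !(pairs.any (fun q => (PySem.Str.split₀ q).contains w)))
      pairs [] [] (PySem.Str.split₀ s) _ hsafe hqb (fun w => le_refl _)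
      (fun w => by simp [pvDemand]) hcounts
  simp only [find_and_order_pairs, find_and_order_pairs_alt]
  rw [Prod.mk.injEq]
  constructor
  · rw [hfound, List.nil_append]
  · apply congrArg
    rw [pv_drop_eq_filter, hfilter]
    apply List.filter_congr
    intro w _
    congr 1
    have hmem := pv_pws_mem pairs PySem.Set.empty w
    by_cases h : ∃ q ∈ pairs, w ∈ PySem.Str.split₀ q
    · have h1 : PySem.Set.contains (pairs.foldl
          (fun t p => PySem.Set.update t (PySem.Str.split₀ p)) PySem.Set.empty) w = true :=
        (PySem.Set.contains_iff _ _).mpr (hmem.mpr (Or.inr h))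
      have h2 : pairs.any (fun q => (PySem.Str.split₀ q).contains w) = true := by
        simp only [List.any_eq_true, List.contains_iff_mem]; exact h
      rw [h1, h2]
    · have h1 : PySem.Set.contains (pairs.foldl
          (fun t p => PySem.Set.update t (PySem.Str.split₀ p)) PySem.Set.empty) w = false := by
        rw [Bool.eq_false_iff]
        intro hcon
        rcases hmem.mp ((PySem.Set.contains_iff _ _).mp hcon) with he | hex
        · simp [PySem.Set.empty] at he
        · exact h hex
      have h2 : pairs.any (fun q => (PySem.Str.split₀ q).contains w) = false := by
        rw [Bool.eq_false_iff]
        intro hcon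
        apply h
        simpa only [List.any_eq_true, List.contains_iff_mem] using hcon
      rw [h1, h2]
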